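-- pv_equiv track=rewrite | github.com/daseinkapital/Virginia-Tech-Course-Scheduler | CourseScheduler.py | DecisionsPerClass
-- ===== SOURCE A (Python) =====
-- def DecisionsPerClass(test):
--     PossibleDecisions = []
--     for uniqueClass in test:
--         Index = len(uniqueClass)
--         i = 0
--         UniqueDecision = []
--         UTest = []
--         while i < Index:
--             NewString = ""
--             j = 0
--             while j < Index:
--                 if j == i:
--                     NewString += "1"
--                 else:
--                     NewString += "0"
--                 j += 1
--             UniqueDecision.append(NewString)
--             i += 1
--         PossibleDecisions.append(UniqueDecision)
--     return PossibleDecisions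
-- ===== SOURCE B (Python) =====
-- def DecisionsPerClass(test):
--     result = []
--     for uniqueClass in test:
--         n = len(uniqueClass)
--         result.append(["0" * i + "1" + "0" * (n - i - 1) for i in range(n)])
--     return result
-- ===== Notes on version B (the rewrite author's own statement) =====
-- stated objective: simpler
-- what changed: Each one-hot row is built in closed form as '0'*i + '1' + '0'*(n-i-1), removing A's inner character-by-character while loop with its j==i test.
import Mathlib
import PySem

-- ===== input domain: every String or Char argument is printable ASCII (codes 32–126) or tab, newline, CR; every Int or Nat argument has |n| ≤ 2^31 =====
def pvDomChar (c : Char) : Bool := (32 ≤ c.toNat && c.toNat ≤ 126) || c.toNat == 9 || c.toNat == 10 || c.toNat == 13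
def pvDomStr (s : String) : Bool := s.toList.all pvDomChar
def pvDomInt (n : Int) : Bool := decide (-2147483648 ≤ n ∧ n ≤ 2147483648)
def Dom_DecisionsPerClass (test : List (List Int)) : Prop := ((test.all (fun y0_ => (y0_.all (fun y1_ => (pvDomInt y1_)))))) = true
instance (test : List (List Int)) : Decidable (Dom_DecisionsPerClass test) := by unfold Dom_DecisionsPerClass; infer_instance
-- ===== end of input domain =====

-- B builds each one-hot row in closed form ("0"*i ++ "1" ++ "0"*(n-i-1)) instead of A's
-- inner per-character loop with a j == i test; objective: simpler.

-- ===== PORT A =====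
-- inner while loop over j: appends "1" when j == i else "0"
def pvRowA (Index i : Nat) : String :=
  (List.range Index).foldl (fun s j => s ++ (if j == i then "1" else "0")) ""

-- middle while loop over i, appending each NewString
def pvRowsA (Index : Nat) : List String :=
  (List.range Index).foldl (fun acc i => acc ++ [pvRowA Index i]) []

def DecisionsPerClass (test : List (List Int)) : List (List String) :=
  test.foldl (fun acc uniqueClass => acc ++ [pvRowsA uniqueClass.length]) []

-- ===== PORT B =====
-- "0" * i + "1" + "0" * (n - i - 1)
def pvRowB (n i : Nat) : String :=
  String.ofList (List.replicate i '0') ++ "1" ++ String.ofList (List.replicate (n - i - 1) '0')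

def DecisionsPerClass_alt (test : List (List Int)) : List (List String) :=
  test.map (fun uniqueClass =>
    (List.range uniqueClass.length).map (fun i => pvRowB uniqueClass.length i))

-- ===== PRECONDITION & SPEC =====
def Spec_DecisionsPerClass (test : List (List Int)) (out : List (List String)) : Prop := out = DecisionsPerClass_alt test
instance (test : List (List Int)) (out : List (List String)) : Decidable (Spec_DecisionsPerClass test out) := by unfold Spec_DecisionsPerClass; infer_instance

-- ===== CLAIM (what is proved, stated in full; the proofs are below) =====
def Claim_equal_DecisionsPerClass : Prop := ∀ (test : List (List Int)), Dom_DecisionsPerClass test → Spec_DecisionsPerClass test (DecisionsPerClass test)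

-- ===== LEMMAS AND PROOFS =====

theorem foldl_append_map {α β : Type} (f : α → β) (l : List α) (acc : List β) :
    l.foldl (fun a x => a ++ [f x]) acc = acc ++ l.map f := by
  induction l generalizing acc with
  | nil => simp
  | cons h t ih => simp [ih]

theorem range_map_indicator (n i : Nat) (h : i < n) :
    (List.range n).map (fun j => if j == i then '1' else '0')
      = List.replicate i '0' ++ '1' :: List.replicate (n - i - 1) '0' := by
  induction n with
  | zero => omega
  | succ m ih =>
    rw [List.range_succ, List.map_append]
    rcases Nat.lt_succ_iff_lt_or_eq.mp h with h' | h'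
    · rw [ih h']
      have hm : m + 1 - i - 1 = (m - i - 1) + 1 := by omega
      rw [hm, List.replicate_succ']
      have hne : ¬ (m = i) := by omega
      simp [hne]
    · subst h'
      have hz := List.map_congr_left (l := List.range i)
        (f := fun j => if j == i then '1' else '0') (g := fun _ => '0')
        (fun j hj => by have := List.mem_range.mp hj; simp; omega)
      rw [hz]
      simp

theorem rowA_eq_rowB (n i : Nat) (h : i < n) : pvRowA n i = pvRowB n i := by
  have key : ∀ (l : List Nat) (s : String),
      (l.foldl (fun s j => s ++ (if j == i then "1" else "0")) s).toList
        = s.toList ++ l.map (fun j => if j == i then '1' else '0') := by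
    intro l
    induction l with
    | nil => intro s; simp
    | cons a t ih =>
      intro s
      rw [List.foldl_cons, ih]
      by_cases ha : a = i <;> simp [ha]
  apply String.toList_inj.mp
  rw [pvRowA, key, pvRowB, range_map_indicator n i h]
  simp

theorem rowsA_eq (n : Nat) : pvRowsA n = (List.range n).map (fun i => pvRowB n i) := by
  rw [pvRowsA, foldl_append_map, List.nil_append]
  exact List.map_congr_left (fun i hi => rowA_eq_rowB n i (List.mem_range.mp hi))

-- ===== VERDICT (by name: the statement is the Claim_ definition above) =====
theorem DecisionsPerClass_spec : Claim_equal_DecisionsPerClass := by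
  intro test _
  unfold Spec_DecisionsPerClass DecisionsPerClass DecisionsPerClass_alt
  rw [foldl_append_map (fun c => pvRowsA c.length) test [], List.nil_append]
  exact List.map_congr_left (fun c _ => rowsA_eq c.length)
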